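-- pv_equiv track=rewrite | github.com/Diomandeee/karl | karl/process_fingerprint.py | _tool_flow_signature
-- ===== SOURCE A (Python) =====
-- from typing import Any, Dict, List, Tuple
--
-- RESEARCH_TOOLS = {"Read", "Grep", "Glob", "WebSearch", "WebFetch"}
--
-- MUTATION_TOOLS = {"Write", "Edit", "NotebookEdit"}
--
-- EXECUTION_TOOLS = {"Bash"}
--
-- PLANNING_TOOLS = {"EnterPlanMode", "ExitPlanMode", "TaskCreate", "TaskUpdate"}
--
-- def _categorize_tool(tool_name: str) -> str:
--     """Map tool name to category."""
--     if tool_name in RESEARCH_TOOLS: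
--         return "R"
--     if tool_name in MUTATION_TOOLS:
--         return "M"
--     if tool_name in EXECUTION_TOOLS:
--         return "X"
--     if tool_name in PLANNING_TOOLS:
--         return "P"
--     return "O"
--
-- def _tool_flow_signature(events: List[Dict]) -> List[str]:
--     """Extract tool category bigrams (e.g., ['RR', 'RM', 'MX'])."""
--     categories = [_categorize_tool(e.get("tool_name", "")) for e in events]
--     bigrams = []
--     for i in range(len(categories) - 1):
--         bigram = categories[i] + categories[i + 1]
--         bigrams.append(bigram)
--     # Return unique bigrams preserving order
--     seen = set()
--     unique = []
--     for b in bigrams: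
--         if b not in seen:
--             seen.add(b)
--             unique.append(b)
--     return unique
-- ===== SOURCE B (Python) =====
-- from typing import Any, Dict, List, Tuple
--
-- RESEARCH_TOOLS = {"Read", "Grep", "Glob", "WebSearch", "WebFetch"}
--
-- MUTATION_TOOLS = {"Write", "Edit", "NotebookEdit"}
--
-- EXECUTION_TOOLS = {"Bash"}
--
-- PLANNING_TOOLS = {"EnterPlanMode", "ExitPlanMode", "TaskCreate", "TaskUpdate"}
--
-- def _categorize_tool(tool_name: str) -> str:
--     """Map tool name to category."""
--     if tool_name in RESEARCH_TOOLS: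
--         return "R"
--     if tool_name in MUTATION_TOOLS:
--         return "M"
--     if tool_name in EXECUTION_TOOLS:
--         return "X"
--     if tool_name in PLANNING_TOOLS:
--         return "P"
--     return "O"
--
-- def _tool_flow_signature(events: List[Dict]) -> List[str]:
--     """Single streaming pass: no intermediate categories/bigrams lists."""
--     prev = None
--     seen = set()
--     unique = []
--     for e in events:
--         cat = _categorize_tool(e.get("tool_name", ""))
--         if prev is not None:
--             bigram = prev + cat
--             if bigram not in seen:
--                 seen.add(bigram)
--                 unique.append(bigram)
--         prev = cat
--     return unique
-- ===== Notes on version B (the rewrite author's own statement) =====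
-- stated objective: simpler
-- what changed: Replaced the three sequential passes (build categories list, build bigrams list by index loop, then dedup loop) by one streaming pass over events that keeps only the previous category, the seen set and the output list.
import Mathlib
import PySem

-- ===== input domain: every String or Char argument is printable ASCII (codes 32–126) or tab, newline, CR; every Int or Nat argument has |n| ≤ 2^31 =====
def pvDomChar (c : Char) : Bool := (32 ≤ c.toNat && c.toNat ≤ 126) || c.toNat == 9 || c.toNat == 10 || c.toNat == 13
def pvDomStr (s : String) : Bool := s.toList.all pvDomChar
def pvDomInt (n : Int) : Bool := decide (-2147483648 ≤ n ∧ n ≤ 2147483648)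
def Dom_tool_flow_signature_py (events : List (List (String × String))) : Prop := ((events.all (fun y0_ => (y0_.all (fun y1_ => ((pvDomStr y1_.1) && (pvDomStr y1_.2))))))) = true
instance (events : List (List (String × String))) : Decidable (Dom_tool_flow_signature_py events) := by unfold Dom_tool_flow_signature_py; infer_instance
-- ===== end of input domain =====

-- B fuses A's three sequential passes (categories list, bigram index loop, dedup loop)
-- into one streaming pass keeping the previous category, the seen set and the output list.


-- ===== PORT A =====
-- module constants (Python sets of tool names)
def RESEARCH_TOOLS : PySem.Set String := PySem.Set.ofList ["Read", "Grep", "Glob", "WebSearch", "WebFetch"]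
def MUTATION_TOOLS : PySem.Set String := PySem.Set.ofList ["Write", "Edit", "NotebookEdit"]
def EXECUTION_TOOLS : PySem.Set String := PySem.Set.ofList ["Bash"]
def PLANNING_TOOLS : PySem.Set String := PySem.Set.ofList ["EnterPlanMode", "ExitPlanMode", "TaskCreate", "TaskUpdate"]

def categorize_tool (tool_name : String) : String :=
  if PySem.Set.contains RESEARCH_TOOLS tool_name then "R"
  else if PySem.Set.contains MUTATION_TOOLS tool_name then "M"
  else if PySem.Set.contains EXECUTION_TOOLS tool_name then "X"
  else if PySem.Set.contains PLANNING_TOOLS tool_name then "P"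
  else "O"

def tool_flow_signature_py (events : List (List (String × String))) : List String :=
  let categories := events.map (fun e => categorize_tool (PySem.Dict.getD (PySem.Dict.mk e) "tool_name" ""))
  let bigrams := (PySem.List.pyRange 0 ((categories.length : Int) - 1) 1).foldl
      (fun acc i => acc ++ [PySem.List.pyGetD categories i "" ++ PySem.List.pyGetD categories (i + 1) ""]) []
  let fin := bigrams.foldl
      (fun (st : PySem.Set String × List String) b =>
        if ¬ PySem.Set.contains st.1 b then (PySem.Set.add st.1 b, st.2 ++ [b]) else st)
      (PySem.Set.empty, [])
  fin.2

-- ===== PORT B =====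
-- one streaming pass: state = (previous category (None at start), seen set, unique list)
def tfsStep (st : Option String × PySem.Set String × List String)
    (e : List (String × String)) : Option String × PySem.Set String × List String :=
  let cat := categorize_tool (PySem.Dict.getD (PySem.Dict.mk e) "tool_name" "")
  match st with
  | (none, seen, uniq) => (some cat, seen, uniq)
  | (some p, seen, uniq) =>
      let bigram := p ++ cat
      if ¬ PySem.Set.contains seen bigram then (some cat, PySem.Set.add seen bigram, uniq ++ [bigram])
      else (some cat, seen, uniq)

def tool_flow_signature_py_alt (events : List (List (String × String))) : List String :=
  (events.foldl tfsStep (none, PySem.Set.empty, [])).2.2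

-- ===== PRECONDITION & SPEC =====
def Spec_tool_flow_signature_py (events : List (List (String × String))) (out : List String) : Prop := out = tool_flow_signature_py_alt events
instance (events : List (List (String × String))) (out : List String) : Decidable (Spec_tool_flow_signature_py events out) := by unfold Spec_tool_flow_signature_py; infer_instance

-- ===== CLAIM (what is proved, stated in full; the proofs are below) =====
def Claim_equal_tool_flow_signature_py : Prop := ∀ (events : List (List (String × String))), Dom_tool_flow_signature_py events → Spec_tool_flow_signature_py events (tool_flow_signature_py events)

-- ===== LEMMAS AND PROOFS =====

-- adjacent bigrams of a category list, given the preceding category p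
def pvAdj (p : String) : List String → List String
  | [] => []
  | c :: cs => (p ++ c) :: pvAdj c cs

-- A's dedup step
def pvDStep (st : PySem.Set String × List String) (b : String) : PySem.Set String × List String :=
  if ¬ PySem.Set.contains st.1 b then (PySem.Set.add st.1 b, st.2 ++ [b]) else st

lemma pvGetD_cons_succ (x : String) (l : List String) (k : Nat) :
    PySem.List.pyGetD (x :: l) ((k : Int) + 1) "" = PySem.List.pyGetD l (k : Int) "" := by
  have h : (k : Int) + 1 = ((k + 1 : Nat) : Int) := by push_cast; ring
  have h1 := PySem.List.pyGetD_natCast (x :: l) (k + 1) ""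
  rw [← h] at h1
  rw [h1, PySem.List.pyGetD_natCast]
  simp [List.getD]

-- A's index loop over range(len-1) produces exactly the adjacent bigrams
lemma map_adj (cs : List String) :
    (List.range (cs.length - 1)).map
      (fun (k : Nat) => PySem.List.pyGetD cs ((k : Int)) "" ++ PySem.List.pyGetD cs ((k : Int) + 1) "") =
    (match cs with | [] => [] | c :: rest => pvAdj c rest) := by
  induction cs with
  | nil => simp
  | cons a tl ih =>
    cases tl with
    | nil => simp [pvAdj]
    | cons b t =>
      have h := ih
      simp only [List.length_cons, Nat.add_sub_cancel] at h ⊢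
      rw [List.range_succ_eq_map]
      simp only [List.map_cons, List.map_map, pvAdj]
      rw [← h]
      congr 1
      · rw [pvGetD_cons_succ]
        simp
      · apply List.map_congr_left
        intro k _
        simp only [Function.comp, Nat.succ_eq_add_one]
        have h2 : ((k + 1 : Nat) : Int) = (k : Int) + 1 := by push_cast; ring
        rw [h2, pvGetD_cons_succ, show ((k : Int) + 1) + 1 = ((k + 1 : Nat) : Int) + 1 from by rw [h2],
          pvGetD_cons_succ, h2]

-- B's step on an already-computed category
def pvStepC (st : Option String × PySem.Set String × List String) (cat : String) :
    Option String × PySem.Set String × List String :=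
  match st with
  | (none, seen, uniq) => (some cat, seen, uniq)
  | (some p, seen, uniq) =>
      let bigram := p ++ cat
      if ¬ PySem.Set.contains seen bigram then (some cat, PySem.Set.add seen bigram, uniq ++ [bigram])
      else (some cat, seen, uniq)

-- B's streaming pass, started after a first category p, equals A's dedup fold of the bigrams
lemma fold_some (cs : List String) : ∀ (p : String) (seen : PySem.Set String) (uniq : List String),
    (cs.foldl pvStepC (some p, seen, uniq)).2.2 =
    ((pvAdj p cs).foldl pvDStep (seen, uniq)).2 := by
  induction cs with
  | nil => intro p seen uniq; rfl
  | cons c rest ih =>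
    intro p seen uniq
    simp only [List.foldl_cons, pvAdj]
    have hstep : pvStepC (some p, seen, uniq) c =
        if ¬ PySem.Set.contains seen (p ++ c) then
          (some c, PySem.Set.add seen (p ++ c), uniq ++ [p ++ c])
        else (some c, seen, uniq) := rfl
    have hd : pvDStep (seen, uniq) (p ++ c) =
        if ¬ PySem.Set.contains seen (p ++ c) then
          (PySem.Set.add seen (p ++ c), uniq ++ [p ++ c])
        else (seen, uniq) := rfl
    rw [hstep, hd]
    split_ifs with hmem
    · exact ih c _ _
    · exact ih c _ _

-- A's result, written with pvAdj and pvDStep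
lemma A_eq (events : List (List (String × String))) :
    tool_flow_signature_py events =
    (((match events.map (fun e => categorize_tool (PySem.Dict.getD (PySem.Dict.mk e) "tool_name" "")) with
        | [] => ([] : List String)
        | c :: rest => pvAdj c rest).foldl pvDStep (PySem.Set.empty, [])).2) := by
  simp only [tool_flow_signature_py]
  rw [PySem.List.foldl_append_singleton_eq_map, List.nil_append, PySem.List.pyRange_one]
  rw [List.map_map]
  have hlen : (((events.map (fun e => categorize_tool (PySem.Dict.getD (PySem.Dict.mk e) "tool_name" ""))).length : Int) - 1 - 0).toNat =
      (events.map (fun e => categorize_tool (PySem.Dict.getD (PySem.Dict.mk e) "tool_name" ""))).length - 1 := by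
    omega
  rw [hlen]
  rw [show ((fun i => PySem.List.pyGetD (events.map (fun e => categorize_tool (PySem.Dict.getD (PySem.Dict.mk e) "tool_name" ""))) i "" ++
        PySem.List.pyGetD (events.map (fun e => categorize_tool (PySem.Dict.getD (PySem.Dict.mk e) "tool_name" ""))) (i + 1) "") ∘
        (fun k : Nat => (0 : Int) + (k : Int))) =
      (fun (k : Nat) => PySem.List.pyGetD (events.map (fun e => categorize_tool (PySem.Dict.getD (PySem.Dict.mk e) "tool_name" ""))) ((k : Int)) "" ++
        PySem.List.pyGetD (events.map (fun e => categorize_tool (PySem.Dict.getD (PySem.Dict.mk e) "tool_name" ""))) ((k : Int) + 1) "") from by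
      funext k; simp]
  rw [map_adj]
  rfl

-- B's result as a fold of pvStepC over the category list
lemma B_eq (events : List (List (String × String))) :
    tool_flow_signature_py_alt events =
    ((events.map (fun e => categorize_tool (PySem.Dict.getD (PySem.Dict.mk e) "tool_name" ""))).foldl
      pvStepC (none, PySem.Set.empty, [])).2.2 := by
  unfold tool_flow_signature_py_alt
  rw [List.foldl_map]
  rfl

-- ===== VERDICT (by name: the statement is the Claim_ definition above) =====
theorem tool_flow_signature_py_spec : Claim_equal_tool_flow_signature_py := by
  intro events _
  unfold Spec_tool_flow_signature_py
  rw [A_eq, B_eq]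
  cases h : events.map (fun e => categorize_tool (PySem.Dict.getD (PySem.Dict.mk e) "tool_name" "")) with
  | nil => rfl
  | cons c rest =>
    rw [List.foldl_cons, show pvStepC (none, PySem.Set.empty, []) c = (some c, PySem.Set.empty, []) from rfl,
      fold_some]
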